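-- pv_equiv track=rewrite | github.com/sumon9007/appsec-ai-platform | src/reporting/html_report_generator.py | _build_exec_recommendations_html
-- ===== SOURCE A (Python) =====
-- from typing import Dict, List, Tuple
--
-- def _build_exec_recommendations_html(findings: List[Dict]) -> str:
--     critical = [f for f in findings if f.get("severity") == "Critical"]
--     high = [f for f in findings if f.get("severity") == "High"]
--     medium = [f for f in findings if f.get("severity") == "Medium"]
--
--     items = []
--     if critical:
--         items.append(
--             f"<li>Immediately address {len(critical)} critical security issue(s) — "
--             f"action required within 24 hours.</li>"
--         )
--     if high:
--         items.append(
--             f"<li>Address {len(high)} high-priority issue(s) within 7 calendar days.</li>"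
--         )
--     if medium:
--         items.append(
--             f"<li>Plan remediation for {len(medium)} medium-priority issue(s) within 30 days.</li>"
--         )
--     items.append("<li>Schedule a remediation verification session after fixes are deployed.</li>")
--     items.append(
--         "<li>Review the accompanying technical report with the engineering team "
--         "for implementation guidance.</li>"
--     )
--     items.append(
--         "<li>Assign named ownership for each identified issue with agreed target dates.</li>"
--     )
--
--     return f'<ul class="rec-list">{"".join(items)}</ul>'
-- ===== SOURCE B (Python) =====
-- from typing import Dict, List
--
-- def _build_exec_recommendations_html(findings: List[Dict]) -> str:
--     counts = {}
--     for f in findings: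
--         s = f.get("severity")
--         counts[s] = counts.get(s, 0) + 1
--     nc = counts.get("Critical", 0)
--     nh = counts.get("High", 0)
--     nm = counts.get("Medium", 0)
--
--     parts = ['<ul class="rec-list">']
--     if nc:
--         parts.append(
--             f"<li>Immediately address {nc} critical security issue(s) — "
--             f"action required within 24 hours.</li>"
--         )
--     if nh:
--         parts.append(
--             f"<li>Address {nh} high-priority issue(s) within 7 calendar days.</li>"
--         )
--     if nm:
--         parts.append(
--             f"<li>Plan remediation for {nm} medium-priority issue(s) within 30 days.</li>"
--         )
--     parts.append("<li>Schedule a remediation verification session after fixes are deployed.</li>")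
--     parts.append(
--         "<li>Review the accompanying technical report with the engineering team "
--         "for implementation guidance.</li>"
--     )
--     parts.append(
--         "<li>Assign named ownership for each identified issue with agreed target dates.</li>"
--     )
--     parts.append("</ul>")
--     return "".join(parts)
-- ===== Notes on version B (the rewrite author's own statement) =====
-- stated objective: alternative
-- what changed: Replaces A's three separate filter-comprehension passes over findings by a single counting pass into a severity dict, then reads the Critical/High/Medium counts for the guards and the messages; all literal strings and the join/wrap are byte-for-byte identical.
import Mathlib
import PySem

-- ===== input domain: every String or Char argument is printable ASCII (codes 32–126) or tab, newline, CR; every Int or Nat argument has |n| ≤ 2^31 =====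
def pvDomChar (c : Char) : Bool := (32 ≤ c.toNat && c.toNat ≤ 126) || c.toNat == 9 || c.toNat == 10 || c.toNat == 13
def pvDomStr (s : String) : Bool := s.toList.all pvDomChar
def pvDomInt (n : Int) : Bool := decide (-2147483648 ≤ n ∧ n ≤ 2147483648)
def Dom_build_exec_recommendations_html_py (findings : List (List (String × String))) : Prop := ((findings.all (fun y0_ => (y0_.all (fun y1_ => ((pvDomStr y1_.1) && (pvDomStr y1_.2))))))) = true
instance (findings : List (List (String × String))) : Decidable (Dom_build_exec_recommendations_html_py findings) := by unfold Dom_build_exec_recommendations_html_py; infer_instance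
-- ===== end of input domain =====

-- B replaces A's three filter passes over `findings` by a single counting pass into a dict
-- (same output byte for byte); objective: alternative decomposition, no speed claim.

-- f.get("severity") — shared by both sides (both Pythons make exactly this call)
def pvSeverity (f : List (String × String)) : Option String :=
  (PySem.Dict.mk f).get? "severity"

-- ===== PORT A =====
def build_exec_recommendations_html_py (findings : List (List (String × String))) : String :=
  let critical := findings.filter (fun f => pvSeverity f == some "Critical")
  let high := findings.filter (fun f => pvSeverity f == some "High")
  let medium := findings.filter (fun f => pvSeverity f == some "Medium")
  let items : List String := []
  let items := if critical ≠ [] then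
      items ++ ["<li>Immediately address " ++ PySem.Int.toStr (critical.length : Int) ++
        " critical security issue(s) — action required within 24 hours.</li>"]
    else items
  let items := if high ≠ [] then
      items ++ ["<li>Address " ++ PySem.Int.toStr (high.length : Int) ++
        " high-priority issue(s) within 7 calendar days.</li>"]
    else items
  let items := if medium ≠ [] then
      items ++ ["<li>Plan remediation for " ++ PySem.Int.toStr (medium.length : Int) ++
        " medium-priority issue(s) within 30 days.</li>"]
    else items
  let items := items ++ ["<li>Schedule a remediation verification session after fixes are deployed.</li>"]
  let items := items ++ ["<li>Review the accompanying technical report with the engineering team for implementation guidance.</li>"]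
  let items := items ++ ["<li>Assign named ownership for each identified issue with agreed target dates.</li>"]
  "<ul class=\"rec-list\">" ++ PySem.Str.join "" items ++ "</ul>"

-- ===== PORT B =====
def build_exec_recommendations_html_py_alt (findings : List (List (String × String))) : String :=
  let counts := findings.foldl
    (fun d f => let s := pvSeverity f; d.insert s (d.getD s 0 + 1))
    (PySem.Dict.empty : PySem.Dict (Option String) Int)
  let nc := counts.getD (some "Critical") 0
  let nh := counts.getD (some "High") 0
  let nm := counts.getD (some "Medium") 0
  let parts : List String := ["<ul class=\"rec-list\">"]
  let parts := if nc ≠ 0 then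
      parts ++ ["<li>Immediately address " ++ PySem.Int.toStr nc ++
        " critical security issue(s) — action required within 24 hours.</li>"]
    else parts
  let parts := if nh ≠ 0 then
      parts ++ ["<li>Address " ++ PySem.Int.toStr nh ++
        " high-priority issue(s) within 7 calendar days.</li>"]
    else parts
  let parts := if nm ≠ 0 then
      parts ++ ["<li>Plan remediation for " ++ PySem.Int.toStr nm ++
        " medium-priority issue(s) within 30 days.</li>"]
    else parts
  let parts := parts ++ ["<li>Schedule a remediation verification session after fixes are deployed.</li>"]
  let parts := parts ++ ["<li>Review the accompanying technical report with the engineering team for implementation guidance.</li>"]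
  let parts := parts ++ ["<li>Assign named ownership for each identified issue with agreed target dates.</li>"]
  let parts := parts ++ ["</ul>"]
  PySem.Str.join "" parts

-- ===== PRECONDITION & SPEC =====
def Spec_build_exec_recommendations_html_py (findings : List (List (String × String))) (out : String) : Prop := out = build_exec_recommendations_html_py_alt findings
instance (findings : List (List (String × String))) (out : String) : Decidable (Spec_build_exec_recommendations_html_py findings out) := by unfold Spec_build_exec_recommendations_html_py; infer_instance

-- ===== CLAIM (what is proved, stated in full; the proofs are below) =====
def Claim_equal_build_exec_recommendations_html_py : Prop := ∀ (findings : List (List (String × String))), Dom_build_exec_recommendations_html_py findings → Spec_build_exec_recommendations_html_py findings (build_exec_recommendations_html_py findings)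

-- ===== LEMMAS AND PROOFS =====

-- B's dict counts at key `some k` exactly what A's filter at severity k collects.
theorem pv_counts_eq (findings : List (List (String × String))) (k : String) :
    (findings.foldl
      (fun d f => let s := pvSeverity f; d.insert s (d.getD s 0 + 1))
      (PySem.Dict.empty : PySem.Dict (Option String) Int)).getD (some k) 0
    = ((findings.filter (fun f => pvSeverity f == some k)).length : Int) := by
  have h : (findings.foldl
      (fun d f => let s := pvSeverity f; d.insert s (d.getD s 0 + 1))
      (PySem.Dict.empty : PySem.Dict (Option String) Int))
      = (findings.map pvSeverity).foldl
        (fun d s => d.insert s (d.getD s 0 + 1)) PySem.Dict.empty := by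
    rw [List.foldl_map]
  rw [h, PySem.Dict.getD_foldl_insert_add_one, PySem.Dict.getD_empty]
  have : (findings.map pvSeverity).count (some k)
      = (findings.filter (fun f => pvSeverity f == some k)).length := by
    rw [List.count, List.countP_map, List.countP_eq_length_filter]
    rfl
  omega

theorem pv_join_nil_flatten (l : List (List Char)) : PySem.Chars.join [] l = l.flatten := by
  induction l with
  | nil => rfl
  | cons x r ih =>
    cases r with
    | nil => simp [PySem.Chars.join, List.intercalate]
    | cons y t =>
      simp only [PySem.Chars.join, List.intercalate] at ih ⊢
      rw [show List.intersperse ([] : List Char) (x :: y :: t) = x :: [] :: List.intersperse [] (y :: t) from by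
        simp [List.intersperse]]
      simp [ih]

theorem pv_ne_nil_iff (l : List (List (String × String))) :
    (l ≠ []) ↔ ((l.length : Int) ≠ 0) := by
  constructor
  · intro h h0
    exact h (List.eq_nil_of_length_eq_zero (by exact_mod_cast h0))
  · intro h h0
    exact h (by simp [h0])

-- ===== VERDICT (by name: the statement is the Claim_ definition above) =====
set_option maxRecDepth 4000 in
theorem build_exec_recommendations_html_py_spec : Claim_equal_build_exec_recommendations_html_py := by
  intro findings _
  unfold Spec_build_exec_recommendations_html_py
  unfold build_exec_recommendations_html_py build_exec_recommendations_html_py_alt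
  dsimp only
  rw [pv_counts_eq findings "Critical", pv_counts_eq findings "High",
    pv_counts_eq findings "Medium"]
  simp only [← pv_ne_nil_iff]
  by_cases hc : findings.filter (fun f => pvSeverity f == some "Critical") = [] <;>
  by_cases hh : findings.filter (fun f => pvSeverity f == some "High") = [] <;>
  by_cases hm : findings.filter (fun f => pvSeverity f == some "Medium") = [] <;>
  (apply String.toList_inj.mp;
   simp [hc, hh, hm, PySem.Str.toList_join, pv_join_nil_flatten])
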